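-- pv_equiv track=rewrite | github.com/diegobq/ejercicios_python | Clase02/diccionario_geringoso.py | geringoso_translator
-- ===== SOURCE A (Python) =====
-- def geringoso_translator(cadena):
--     '''
--     Traduce una palabra al jeringoso
--
--     Parameters
--     ----------
--     cadena : String
--         Palabra que se quiere traducir al jeringoso.
--
--     Returns
--     -------
--     Palabra en jeringoso.
--
--     '''
--     capadepenapa = ''
--     vocales = 'aeiou'
--     for c in cadena:
--     	capadepenapa += c
--     	if(c.lower() in vocales):
--     		capadepenapa += 'p' + c
--
--     return capadepenapa
-- ===== SOURCE B (Python) =====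
-- def geringoso_translator(cadena):
--     # Ten whole-string replacement passes, one per vowel (case preserved),
--     # instead of a character-by-character accumulator loop.  Correct because
--     # each pass inserts only copies of its own vowel and the consonant 'p',
--     # which no later pass touches.
--     for v in 'aeiouAEIOU':
--         cadena = cadena.replace(v, v + 'p' + v)
--     return cadena
-- ===== Notes on version B (the rewrite author's own statement) =====
-- stated objective: faster
-- what changed: Replaces the per-character accumulator loop with ten whole-string str.replace passes, one per vowel (lower and upper case), each inserting 'p'+vowel after its vowel.
import Mathlib
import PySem

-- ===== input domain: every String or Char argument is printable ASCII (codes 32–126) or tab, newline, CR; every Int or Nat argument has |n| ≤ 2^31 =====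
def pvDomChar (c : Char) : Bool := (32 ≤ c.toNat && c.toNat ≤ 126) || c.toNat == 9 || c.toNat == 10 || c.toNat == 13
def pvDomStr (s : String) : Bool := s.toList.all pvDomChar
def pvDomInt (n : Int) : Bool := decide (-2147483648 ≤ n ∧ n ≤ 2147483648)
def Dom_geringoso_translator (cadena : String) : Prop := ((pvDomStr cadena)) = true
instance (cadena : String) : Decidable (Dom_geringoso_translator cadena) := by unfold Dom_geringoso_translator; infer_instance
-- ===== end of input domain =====

-- B replaces A's per-character accumulator loop with ten whole-string replace passes (one per vowel, both cases); same return value, a different pass structure.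

-- ===== PORT A =====
-- A: accumulator loop; 'c.lower() in vocales' is a substring test of the 1-char string in "aeiou"
def geringoso_translator (cadena : String) : String :=
  String.ofList (cadena.toList.foldl
    (fun capadepenapa c =>
      let capadepenapa := capadepenapa ++ [c]
      if PySem.Chars.isIn [PySem.Chars.lowerChar c] ['a','e','i','o','u'] then
        capadepenapa ++ ['p', c]
      else
        capadepenapa) [])

-- ===== PORT B =====
-- B: for v in 'aeiouAEIOU': cadena = cadena.replace(v, v + 'p' + v); return cadena
def geringoso_translator_alt (cadena : String) : String :=
  "aeiouAEIOU".toList.foldl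
    (fun s v => PySem.Str.replace s (String.ofList [v]) (String.ofList [v, 'p', v])) cadena

-- ===== PRECONDITION & SPEC =====
def Spec_geringoso_translator (cadena : String) (out : String) : Prop := out = geringoso_translator_alt cadena
instance (cadena : String) (out : String) : Decidable (Spec_geringoso_translator cadena out) := by unfold Spec_geringoso_translator; infer_instance

-- ===== CLAIM (what is proved, stated in full; the proofs are below) =====
def Claim_equal_geringoso_translator : Prop := ∀ (cadena : String), Dom_geringoso_translator cadena → Spec_geringoso_translator cadena (geringoso_translator cadena)

-- ===== LEMMAS AND PROOFS =====

-- the piece a character contributes once the vowels in S have been processed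
def gerPiece (S : List Char) (c : Char) : List Char := if c ∈ S then [c, 'p', c] else [c]

-- replace with a single-character pattern is a per-character flatMap
lemma go_singleton (v : Char) (new : List Char) (fuel : Nat) (l acc : List Char)
    (h : l.length ≤ fuel) :
    PySem.Chars.replace.go [v] new fuel l acc
      = acc.reverse ++ l.flatMap (fun c => if c = v then new else [c]) := by
  induction fuel generalizing l acc with
  | zero =>
    interval_cases hl : l.length
    · simp at hl; subst hl; simp [PySem.Chars.replace.go]
  | succ n ih =>
    cases l with
    | nil => simp [PySem.Chars.replace.go]
    | cons c t =>
      simp only [PySem.Chars.replace.go]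
      by_cases hc : c = v
      · subst hc
        rw [if_pos (by simp)]
        rw [ih _ _ (by simpa using Nat.le_of_succ_le_succ h)]
        simp
      · rw [if_neg (by simp [List.isPrefixOf]; exact fun h' => hc h'.symm)]
        rw [ih _ _ (by simpa using Nat.le_of_succ_le_succ h)]
        simp [hc]

lemma replace_singleton (s : List Char) (v : Char) (new : List Char) :
    PySem.Chars.replace s [v] new = s.flatMap (fun c => if c = v then new else [c]) := by
  unfold PySem.Chars.replace
  rw [if_neg (by simp)]
  simpa using go_singleton v new s.length s [] le_rfl

-- one replace pass moves one vowel from "pending" to "processed"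
lemma piece_step (S : List Char) (v : Char) (hvS : v ∉ S) (hvp : v ≠ 'p') (c : Char) :
    (gerPiece S c).flatMap (fun c' => if c' = v then [v, 'p', v] else [c'])
      = gerPiece (S ++ [v]) c := by
  unfold gerPiece
  by_cases hc : c ∈ S
  · have h1 : c ≠ v := fun h => hvS (h ▸ hc)
    have h2 : ('p' : Char) ≠ v := fun h => hvp h.symm
    simp [hc, h1, h2]
  · by_cases hcv : c = v
    · subst hcv; simp [hc]
    · simp [hc, hcv]

-- folding replace passes over a vowel list V equals processing S ++ V at once
lemma key (V : List Char) : ∀ (S : List Char), (∀ v ∈ V, v ∉ S) → V.Nodup → 'p' ∉ V →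
    ∀ l : List Char,
      V.foldl (fun s v => PySem.Chars.replace s [v] [v, 'p', v]) (l.flatMap (gerPiece S))
        = l.flatMap (gerPiece (S ++ V)) := by
  induction V with
  | nil => intro S _ _ _ l; simp
  | cons v V' ih =>
    intro S hdisj hnd hp l
    simp only [List.foldl_cons]
    rw [replace_singleton, List.flatMap_assoc]
    have hstep : (fun c => (gerPiece S c).flatMap (fun c' => if c' = v then [v, 'p', v] else [c']))
        = gerPiece (S ++ [v]) := by
      funext c
      exact piece_step S v (hdisj v (by simp)) (fun h => hp (by simp [h])) c
    rw [hstep]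
    have := ih (S ++ [v])
      (fun u hu => by
        simp only [List.mem_append, List.mem_singleton]
        rintro (h | h)
        · exact hdisj u (by simp [hu]) h
        · exact (List.nodup_cons.mp hnd).1 (h ▸ hu))
      (List.nodup_cons.mp hnd).2
      (fun h => hp (by simp [h])) l
    rw [this, List.append_assoc]
    rfl

-- A's vowel test equals plain membership in the ten vowels
lemma lower_vowel (c : Char) :
    PySem.Chars.isIn [PySem.Chars.lowerChar c] ['a','e','i','o','u'] =
      decide (c ∈ (['a','e','i','o','u','A','E','I','O','U'] : List Char)) := by
  by_cases h : c ∈ (['a','e','i','o','u','A','E','I','O','U'] : List Char)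
  · simp only [h, decide_true]
    fin_cases h <;> decide
  · simp only [h, decide_false]
    rw [Bool.eq_false_iff]
    intro hin
    rw [PySem.Chars.isIn_iff_infix, List.singleton_infix_iff] at hin
    apply h
    unfold PySem.Chars.lowerChar PySem.Chars.isupper at hin
    split at hin
    · rename_i hup
      simp only [Bool.and_eq_true, decide_eq_true_eq] at hup
      obtain ⟨h1, h2⟩ := hup
      have hA : (65 : Nat) ≤ c.toNat := Fin.mk_le_mk.mp h1
      have hZ : c.toNat ≤ 90 := Fin.mk_le_mk.mp h2
      have hofNat : (Char.ofNat (c.toNat + 32)).toNat = c.toNat + 32 := by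
        rw [Char.toNat_ofNat, if_pos (Or.inl (by omega))]
      simp only [List.mem_cons, List.not_mem_nil, or_false] at hin
      have hc : c.toNat = 65 ∨ c.toNat = 69 ∨ c.toNat = 73 ∨ c.toNat = 79 ∨ c.toNat = 85 := by
        rcases hin with h | h | h | h | h <;>
          (have := congrArg Char.toNat h
           rw [hofNat] at this
           simp only [show ('a':Char).toNat = 97 from rfl, show ('e':Char).toNat = 101 from rfl,
             show ('i':Char).toNat = 105 from rfl, show ('o':Char).toNat = 111 from rfl,
             show ('u':Char).toNat = 117 from rfl] at this
           omega)
      have hback := Char.ofNat_toNat c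
      rcases hc with h | h | h | h | h <;> rw [h] at hback <;> rw [← hback] <;> decide
    · simp only [List.mem_cons] at hin ⊢
      tauto

-- A's loop is the single-shot flatMap over all ten vowels
lemma a_flatMap (l : List Char) :
    l.foldl
      (fun capadepenapa c =>
        let capadepenapa := capadepenapa ++ [c]
        if PySem.Chars.isIn [PySem.Chars.lowerChar c] ['a','e','i','o','u'] then
          capadepenapa ++ ['p', c]
        else
          capadepenapa) []
      = l.flatMap (gerPiece ['a','e','i','o','u','A','E','I','O','U']) := by
  have h : (fun (capadepenapa : List Char) (c : Char) =>
      let capadepenapa := capadepenapa ++ [c]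
      if PySem.Chars.isIn [PySem.Chars.lowerChar c] ['a','e','i','o','u'] then
        capadepenapa ++ ['p', c]
      else
        capadepenapa)
      = fun acc c => acc ++ gerPiece ['a','e','i','o','u','A','E','I','O','U'] c := by
    funext acc c
    simp only [lower_vowel c]
    unfold gerPiece
    by_cases hc : c ∈ (['a','e','i','o','u','A','E','I','O','U'] : List Char) <;> simp [hc]
  rw [h, PySem.List.foldl_append_eq_flatMap]
  simp

-- ===== VERDICT (by name: the statement is the Claim_ definition above) =====
theorem geringoso_translator_spec : Claim_equal_geringoso_translator := by
  intro cadena _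
  unfold Spec_geringoso_translator geringoso_translator geringoso_translator_alt
  apply String.ext  -- compare as lists of characters
  rw [a_flatMap]
  have hfold : ∀ (V : List Char) (s : String),
      (V.foldl (fun s v => PySem.Str.replace s (String.ofList [v]) (String.ofList [v, 'p', v])) s).toList
        = V.foldl (fun t v => PySem.Chars.replace t [v] [v, 'p', v]) s.toList := by
    intro V
    induction V with
    | nil => intro s; rfl
    | cons v V' ih =>
      intro s
      simp only [List.foldl_cons]
      rw [ih, PySem.Str.toList_replace, String.toList_ofList, String.toList_ofList]
  rw [String.toList_ofList, hfold]
  have hkey := key "aeiouAEIOU".toList [] (by simp) (by decide) (by decide) cadena.toList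
  have h0 : cadena.toList.flatMap (gerPiece []) = cadena.toList := by
    have hg : gerPiece [] = fun c => [c] := by funext c; simp [gerPiece]
    rw [hg]; simp
  rw [h0] at hkey
  rw [hkey]
  rfl
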